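-- pv_equiv track=rewrite | github.com/Steins-Chris/contract-analyzer | nlp_analyzer.py | classify_contract_type
-- ===== SOURCE A (Python) =====
-- def classify_contract_type(text: str) -> str:
--     text_lower = text.lower()
--     contract_types = {
--         "Employment Agreement": ["employment", "employee", "employer", "salary", "job title"],
--         "Vendor Contract": ["vendor", "supplier", "purchase order", "goods"],
--         "Lease Agreement": ["lease", "rent", "tenant", "landlord", "premises"],
--         "Partnership Deed": ["partnership", "partners", "profit sharing"],
--         "Service Contract": ["service provider", "client", "deliverables"],
--         "NDA": ["confidential", "non-disclosure", "proprietary"],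
--     }
--     scores = {}
--     for contract_type, keywords in contract_types.items():
--         score = sum(1 for keyword in keywords if keyword in text_lower)
--         scores[contract_type] = score
--     return max(scores, key=scores.get) if max(scores.values()) > 0 else "General Contract"
-- ===== SOURCE B (Python) =====
-- def classify_contract_type(text: str) -> str:
--     text_lower = text.lower()
--     contract_types = [
--         ("Employment Agreement", ["employment", "employee", "employer", "salary", "job title"]),
--         ("Vendor Contract", ["vendor", "supplier", "purchase order", "goods"]),
--         ("Lease Agreement", ["lease", "rent", "tenant", "landlord", "premises"]),
--         ("Partnership Deed", ["partnership", "partners", "profit sharing"]),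
--         ("Service Contract", ["service provider", "client", "deliverables"]),
--         ("NDA", ["confidential", "non-disclosure", "proprietary"]),
--     ]
--
--     def best(items):
--         # recursion from the back: the winner of the tail challenges the head;
--         # the head keeps the crown only with a positive score at least the tail's,
--         # so the FIRST maximum wins and an all-zero table yields the default.
--         if not items:
--             return ("General Contract", 0)
--         (name, keywords) = items[0]
--         score = len([k for k in keywords if k in text_lower])
--         (tail_name, tail_score) = best(items[1:])
--         if score > 0 and score >= tail_score:
--             return (name, score)
--         return (tail_name, tail_score)
--
--     return best(contract_types)[0]
-- ===== Notes on version B (the rewrite author's own statement) =====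
-- stated objective: alternative
-- what changed: Replaces A's staged dict-building plus two max passes with a single recursive descent over the type table: the recursion computes the tail's champion first and the head overrides it only with a positive score at least as large, so no dict, no max call and no running-best loop exist; tie-breaking and the all-zero default fall out of the >= comparison against the tail.
import Mathlib
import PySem

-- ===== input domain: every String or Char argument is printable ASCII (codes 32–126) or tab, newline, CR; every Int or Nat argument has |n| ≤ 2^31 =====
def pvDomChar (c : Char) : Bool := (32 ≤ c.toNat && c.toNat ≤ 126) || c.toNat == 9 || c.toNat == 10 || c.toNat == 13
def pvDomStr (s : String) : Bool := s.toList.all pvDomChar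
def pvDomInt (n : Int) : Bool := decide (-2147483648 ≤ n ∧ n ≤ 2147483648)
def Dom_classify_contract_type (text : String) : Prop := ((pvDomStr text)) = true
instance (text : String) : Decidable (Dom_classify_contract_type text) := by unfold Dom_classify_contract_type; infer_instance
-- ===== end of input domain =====

-- B replaces A's scores dict and its two max passes with one recursive descent over the
-- table in which the head challenges the tail's champion (objective: alternative).

-- ===== PORT A =====
-- the contract-type table, a module-level constant shared verbatim by both ports
def pvTable : List (String × List String) :=
  [("Employment Agreement", ["employment", "employee", "employer", "salary", "job title"]),
   ("Vendor Contract", ["vendor", "supplier", "purchase order", "goods"]),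
   ("Lease Agreement", ["lease", "rent", "tenant", "landlord", "premises"]),
   ("Partnership Deed", ["partnership", "partners", "profit sharing"]),
   ("Service Contract", ["service provider", "client", "deliverables"]),
   ("NDA", ["confidential", "non-disclosure", "proprietary"])]

def classify_contract_type (text : String) : String :=
  let text_lower := PySem.Str.lower text
  let contract_types : PySem.Dict String (List String) := PySem.Dict.ofList pvTable
  let scores : PySem.Dict String Int :=
    contract_types.items.foldl
      (fun d p =>
        d.insert p.1 (((p.2.filter (fun keyword => PySem.Str.isIn keyword text_lower)).map
          (fun _ => (1 : Int))).sum))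
      PySem.Dict.empty
  -- scores.get k is always an int here (every key is in scores) and scores.values is never
  -- empty (6 entries), so the .getD defaults below are never taken
  if (PySem.List.max? scores.values (fun v => v)).getD 0 > 0 then
    (PySem.List.max? scores.keys (fun k => scores.getD k 0)).getD "General Contract"
  else "General Contract"

-- ===== PORT B =====
-- Source B's inner 'best': recursion from the back; the head keeps the crown only with a
-- positive score at least the tail champion's
def pvBestB (text_lower : String) : List (String × List String) → String × Int
  | [] => ("General Contract", 0)
  | (name, keywords) :: rest =>
    let score : Int := ((keywords.filter (fun k => PySem.Str.isIn k text_lower)).length : Int)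
    let tb := pvBestB text_lower rest
    if score > 0 ∧ score ≥ tb.2 then (name, score) else tb

def classify_contract_type_alt (text : String) : String :=
  let text_lower := PySem.Str.lower text
  (pvBestB text_lower pvTable).1

-- ===== PRECONDITION & SPEC =====
def Spec_classify_contract_type (text : String) (out : String) : Prop := out = classify_contract_type_alt text
instance (text : String) (out : String) : Decidable (Spec_classify_contract_type text out) := by unfold Spec_classify_contract_type; infer_instance

-- ===== CLAIM (what is proved, stated in full; the proofs are below) =====
def Claim_equal_classify_contract_type : Prop := ∀ (text : String), Dom_classify_contract_type text → Spec_classify_contract_type text (classify_contract_type text)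

-- ===== LEMMAS AND PROOFS =====

-- A's forward strict-update step, as a named function for the proofs
def pvUpd (best p : String × Int) : String × Int := if p.2 > best.2 then p else best

-- B's backward recursion over (name, score) pairs, abstracted from the keyword table
def pvBestP : List (String × Int) → String × Int
  | [] => ("General Contract", 0)
  | p :: t =>
    let tb := pvBestP t
    if p.2 > 0 ∧ p.2 ≥ tb.2 then (p.1, p.2) else tb

-- A's per-type score (sum of 1 over a filter) is a filter length
lemma pv_sum_filter (l : List String) (p : String → Bool) :
    ((l.filter p).map (fun _ => (1 : Int))).sum = (l.countP p : Int) := by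
  rw [PySem.List.sum_map_const_int]
  simp [List.countP_eq_length_filter]

-- the step of PySem.List.max?, named so the proofs can talk about it
def pvStep {β : Type} (g : β → Int) (acc : Option β) (x : β) : Option β :=
  match acc with
  | none => some x
  | some m => if g m < g x then some x else some m

lemma pv_max?_eq {β : Type} (xs : List β) (key : β → Int) :
    PySem.List.max? xs key = xs.foldl (pvStep key) none := rfl

-- max? over a projected list, when the key agrees with .2 on members, is max? by .2 projected
lemma pv_max_fold {β : Type} (f : (String × Int) → β) (g : β → Int)
    (L : List (String × Int)) (hg : ∀ p ∈ L, g (f p) = p.2) :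
    ∀ (acc : Option (String × Int)), (∀ m, acc = some m → g (f m) = m.2) →
      List.foldl (pvStep g) (acc.map f) (L.map f)
      = (List.foldl (pvStep (fun p => p.2)) acc L).map f := by
  induction L with
  | nil => intro acc _; rfl
  | cons q t ih =>
    intro acc hacc
    have hq : g (f q) = q.2 := hg q (by simp)
    have ht : ∀ p ∈ t, g (f p) = p.2 := fun p hp => hg p (by simp [hp])
    cases acc with
    | none =>
      simp only [List.map, Option.map_none, List.foldl, pvStep]
      exact ih ht (some q) (by intro m hm; injection hm with h; subst h; exact hq)
    | some m =>
      have hm : g (f m) = m.2 := hacc m rfl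
      simp only [List.map, Option.map_some, List.foldl, pvStep, hm, hq]
      by_cases h : m.2 < q.2
      · simp only [if_pos h]
        exact ih ht (some q) (by intro m hm; injection hm with h; subst h; exact hq)
      · simp only [if_neg h]
        exact ih ht (some m) (by intro x hx; injection hx with h; subst h; exact hm)

lemma pv_max?_proj {β : Type} (f : (String × Int) → β) (g : β → Int)
    (L : List (String × Int)) (hg : ∀ p ∈ L, g (f p) = p.2) :
    PySem.List.max? (L.map f) g = (PySem.List.max? L (fun p => p.2)).map f := by
  rw [pv_max?_eq, pv_max?_eq]
  exact pv_max_fold f g L hg none (by intro m hm; cases hm)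

-- max? by .2 on a nonempty list is the running strict-update fold
lemma pv_max?_cons (q : String × Int) (t : List (String × Int)) :
    PySem.List.max? (q :: t) (fun p : String × Int => p.2) = some (t.foldl pvUpd q) := by
  rw [pv_max?_eq]
  simp only [List.foldl, pvStep]
  induction t generalizing q with
  | nil => rfl
  | cons r t ih =>
    simp only [List.foldl, pvStep]
    rw [← ih (pvUpd q r)]
    congr 1
    unfold pvUpd
    by_cases h : q.2 < r.2 <;> simp [h, gt_iff_lt]

-- the heart: A's "argmax if the max is positive, else default" equals B's scan seeded with (default, 0)
lemma pv_core (L : List (String × Int)) (h : ∀ q ∈ L, 0 ≤ q.2) :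
    ∀ (m : String × Int), 0 ≤ m.2 → ∀ g : String,
    (if 0 < (L.foldl pvUpd m).2 then (L.foldl pvUpd m).1 else g)
      = (L.foldl pvUpd (if 0 < m.2 then m else (g, 0))).1 := by
  induction L with
  | nil =>
    intro m _ g
    by_cases h0 : 0 < m.2 <;> simp [h0]
  | cons q t ih =>
    intro m hm g
    have hq : 0 ≤ q.2 := h q (by simp)
    have ht : ∀ r ∈ t, 0 ≤ r.2 := fun r hr => h r (by simp [hr])
    simp only [List.foldl]
    by_cases h0 : 0 < m.2
    · rw [if_pos h0]
      have h2 : 0 ≤ (pvUpd m q).2 := by unfold pvUpd; split <;> [exact hq; exact hm]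
      have h3 : 0 < (pvUpd m q).2 := by
        unfold pvUpd; split
        · next hlt => exact lt_of_lt_of_le h0 (le_of_lt hlt)
        · exact h0
      rw [ih ht (pvUpd m q) h2 g, if_pos h3]
    · rw [if_neg h0]
      have hm0 : m.2 = 0 := le_antisymm (not_lt.1 h0) hm
      by_cases hq0 : 0 < q.2
      · have h1 : pvUpd (g, 0) q = q := by unfold pvUpd; simp [hq0, gt_iff_lt]
        have h2 : pvUpd m q = q := by unfold pvUpd; simp [hm0, hq0, gt_iff_lt]
        rw [h1, h2, ih ht q (le_of_lt hq0) g, if_pos hq0]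
      · have hq0' : q.2 ≤ 0 := not_lt.1 hq0
        have h1 : pvUpd (g, 0) q = (g, 0) := by unfold pvUpd; simp [gt_iff_lt, not_lt.1 hq0]
        have h2 : pvUpd m q = m := by unfold pvUpd; simp [gt_iff_lt, hm0, not_lt.1 hq0]
        rw [h1, h2, ih ht m hm g, if_neg h0]

-- A's dict-and-double-max computation equals a forward strict-update fold, for any score
-- predicate and any keyword table with distinct names
lemma pv_bridge (pred : String → Bool) (T : List (String × List String))
    (hnd : (T.map (fun p => p.1)).Nodup) (hne : T ≠ []) :
    (let d : PySem.Dict String Int :=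
      T.foldl (fun d p => d.insert p.1 ((p.2.countP pred : Int))) PySem.Dict.empty
     if (PySem.List.max? d.values (fun v => v)).getD 0 > 0 then
       (PySem.List.max? d.keys (fun k => d.getD k 0)).getD "General Contract"
     else "General Contract")
    = (T.foldl (fun best p =>
        if ((p.2.countP pred : Int)) > best.2 then (p.1, ((p.2.countP pred : Int))) else best)
        ("General Contract", (0 : Int))).1 := by
  dsimp only
  have hitems : (T.foldl (fun d p => d.insert p.1 ((p.2.countP pred : Int))) PySem.Dict.empty).items
      = T.map (fun p => (p.1, ((p.2.countP pred : Int)))) := by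
    have h := PySem.Dict.items_foldl_insert_fresh (l := T) (k := fun p => p.1)
      (v := fun p => ((p.2.countP pred : Int))) (d := PySem.Dict.empty)
      (by intro a _; simp) hnd
    simpa using h
  set d : PySem.Dict String Int :=
    T.foldl (fun d p => d.insert p.1 ((p.2.countP pred : Int))) PySem.Dict.empty with hd
  set L : List (String × Int) := T.map (fun p => (p.1, ((p.2.countP pred : Int)))) with hLdef
  have hkeysL : d.keys = L.map (fun x => x.1) := by
    simp only [PySem.Dict.keys, hitems]
  have hvalsL : d.values = L.map (fun x => x.2) := by
    simp only [PySem.Dict.values, hitems]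
  have hkeysT : L.map (fun x => x.1) = T.map (fun p => p.1) := by
    rw [hLdef]; simp
  have hkeysNodup : d.keys.Nodup := by rw [hkeysL, hkeysT]; exact hnd
  have hnn : ∀ r ∈ L, 0 ≤ r.2 := by
    intro r hr
    rw [hLdef] at hr
    obtain ⟨p, -, rfl⟩ := List.mem_map.1 hr
    exact Int.natCast_nonneg _
  have hlook : ∀ p ∈ L, d.getD p.1 0 = p.2 := by
    intro p hp
    have hmem : (p.1, p.2) ∈ d.items := by rw [hitems]; simpa using hp
    have := PySem.Dict.get?_of_mem_items d hmem hkeysNodup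
    simp [PySem.Dict.getD, this]
  have hval : PySem.List.max? d.values (fun v => v)
      = (PySem.List.max? L (fun p => p.2)).map (fun x => x.2) := by
    rw [hvalsL]
    exact pv_max?_proj _ _ L (by intro p _; rfl)
  have hkey : PySem.List.max? d.keys (fun k => d.getD k 0)
      = (PySem.List.max? L (fun p => p.2)).map (fun x => x.1) := by
    rw [hkeysL]
    exact pv_max?_proj _ _ L hlook
  have hB : (T.foldl (fun best p =>
        if ((p.2.countP pred : Int)) > best.2 then (p.1, ((p.2.countP pred : Int))) else best)
        ("General Contract", (0 : Int)))
      = L.foldl pvUpd ("General Contract", (0 : Int)) := by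
    rw [hLdef, List.foldl_map]; rfl
  obtain ⟨q, rest, hcons⟩ : ∃ q rest, L = q :: rest := by
    cases T with
    | nil => exact absurd rfl hne
    | cons a t => exact ⟨_, _, by rw [hLdef]; rfl⟩
  rw [hval, hkey, hB, hcons, pv_max?_cons, List.foldl]
  simp only [Option.map_some, Option.getD_some]
  have hq : 0 ≤ q.2 := hnn q (by rw [hcons]; simp)
  have hrest : ∀ r ∈ rest, 0 ≤ r.2 := fun r hr => hnn r (by rw [hcons]; simp [hr])
  have hstart : pvUpd ("General Contract", (0 : Int)) q = if 0 < q.2 then q else ("General Contract", 0) := by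
    unfold pvUpd; simp [gt_iff_lt]
  rw [hstart]
  exact pv_core rest hrest q hq "General Contract"

-- the forward strict-update fold from any nonnegatively-scored seed is B's backward recursion
-- capped at the seed
lemma pv_fold_best (L : List (String × Int)) :
    ∀ init : String × Int, 0 ≤ init.2 →
      L.foldl pvUpd init = if (pvBestP L).2 > init.2 then pvBestP L else init := by
  induction L with
  | nil =>
    intro init h
    simp [pvBestP, not_lt.2 h]
  | cons p t ih =>
    intro init hinit
    simp only [List.foldl, pvBestP]
    by_cases hp : p.2 > init.2
    · have hupd : pvUpd init p = p := by unfold pvUpd; simp [hp]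
      rw [hupd, ih p (le_trans hinit (le_of_lt hp))]
      by_cases hge : p.2 ≥ (pvBestP t).2
      · have hpos : p.2 > 0 ∧ p.2 ≥ (pvBestP t).2 := ⟨lt_of_le_of_lt hinit hp, hge⟩
        rw [if_pos hpos]
        have : ¬ (pvBestP t).2 > p.2 := not_lt.2 hge
        simp [this, hp]
      · have hlt : (pvBestP t).2 > p.2 := lt_of_not_ge hge
        have hcond : ¬ (p.2 > 0 ∧ p.2 ≥ (pvBestP t).2) := fun h => absurd h.2 hge
        rw [if_neg hcond, if_pos hlt, if_pos (lt_trans hp hlt)]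
    · have hupd : pvUpd init p = init := by unfold pvUpd; simp [hp]
      rw [hupd, ih init hinit]
      by_cases hc : p.2 > 0 ∧ p.2 ≥ (pvBestP t).2
      · rw [if_pos hc]
        have h1 : ¬ (pvBestP t).2 > init.2 :=
          not_lt.2 (le_trans hc.2 (not_lt.1 hp))
        have h2 : ¬ ((p.1, p.2) : String × Int).2 > init.2 := hp
        simp [h1, h2]
      · rw [if_neg hc]

-- when every score is nonnegative and the champion's score is not positive, the recursion
-- returned its base default
lemma pvBestP_zero (L : List (String × Int)) (h : ∀ q ∈ L, 0 ≤ q.2)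
    (h0 : ¬ (pvBestP L).2 > 0) : pvBestP L = ("General Contract", 0) := by
  induction L with
  | nil => rfl
  | cons p t ih =>
    simp only [pvBestP] at h0 ⊢
    by_cases hc : p.2 > 0 ∧ p.2 ≥ (pvBestP t).2
    · rw [if_pos hc] at h0 ⊢
      exact absurd hc.1 h0
    · rw [if_neg hc] at h0 ⊢
      exact ih (fun q hq => h q (by simp [hq])) h0

-- forward scan and backward recursion agree on the champion's name
lemma pv_forward_back (L : List (String × Int)) (h : ∀ q ∈ L, 0 ≤ q.2) :
    (L.foldl pvUpd ("General Contract", (0 : Int))).1 = (pvBestP L).1 := by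
  rw [pv_fold_best L ("General Contract", 0) (by norm_num)]
  by_cases h0 : (pvBestP L).2 > 0
  · rw [if_pos h0]
  · rw [if_neg h0, pvBestP_zero L h h0]

-- B's recursion over the table is the abstract recursion over (name, score) pairs
lemma pvBestB_map (tl : String) (T : List (String × List String)) :
    pvBestB tl T
      = pvBestP (T.map (fun p => (p.1,
          (((p.2.filter (fun k => PySem.Str.isIn k tl)).length : Int))))) := by
  induction T with
  | nil => rfl
  | cons p t ih =>
    obtain ⟨name, kws⟩ := p
    simp only [pvBestB, List.map, pvBestP, ih]

-- ===== VERDICT (by name: the statement is the Claim_ definition above) =====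
theorem classify_contract_type_spec : Claim_equal_classify_contract_type := by
  intro text _
  unfold Spec_classify_contract_type classify_contract_type classify_contract_type_alt
  simp only [pv_sum_filter]
  rw [show (PySem.Dict.ofList pvTable).items = pvTable from rfl]
  rw [pv_bridge (fun keyword => PySem.Str.isIn keyword (PySem.Str.lower text)) pvTable
    (by decide) (by decide)]
  rw [show (pvTable.foldl (fun best p =>
        if ((p.2.countP (fun keyword => PySem.Str.isIn keyword (PySem.Str.lower text)) : Int)) > best.2
        then (p.1, ((p.2.countP (fun keyword => PySem.Str.isIn keyword (PySem.Str.lower text)) : Int)))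
        else best) ("General Contract", (0 : Int)))
      = (pvTable.map (fun p => (p.1,
          ((p.2.countP (fun keyword => PySem.Str.isIn keyword (PySem.Str.lower text)) : Int))))).foldl
          pvUpd ("General Contract", (0 : Int)) from by rw [List.foldl_map]; rfl]
  rw [pv_forward_back _ (by
    intro q hq
    obtain ⟨p, -, rfl⟩ := List.mem_map.1 hq
    exact Int.natCast_nonneg _)]
  rw [pvBestB_map]
  simp [List.countP_eq_length_filter]
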